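-- pv_equiv track=rewrite | github.com/ktheis/pqtutor | calculator.py | consume_comment
-- ===== SOURCE A (Python) =====
-- def consume_comment(charlist):
--     cl2 = []
--     while 1:
--         c = charlist.pop(0)
--         if c == " " and cl2 and cl2[-1] == ' ':
--             cl2.append("&nbsp;")
--         else:
--             cl2.append(c)
--         if not charlist or charlist[0] in "!_":
--             break
--     return "".join(cl2).replace('( ', '(')
-- ===== SOURCE B (Python) =====
-- def consume_comment(charlist):
--     # Pass 1: decide how many leading items are consumed (first unconditionally,
--     # then while the next item is not a break token), and remove them from the
--     # caller's list exactly as A's pop(0) loop does.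
--     n = 1
--     while n < len(charlist) and charlist[n] not in "!_":
--         n += 1
--     consumed = charlist[:n]
--     del charlist[:n]
--     # Pass 2: format, tracking only whether the last emitted piece was ' '.
--     out = []
--     prev_space = False
--     for c in consumed:
--         if c == " " and prev_space:
--             out.append("&nbsp;")
--             prev_space = False
--         else:
--             out.append(c)
--             prev_space = c == " "
--     return "".join(out).replace("( ", "(")
-- ===== Notes on version B (the rewrite author's own statement) =====
-- stated objective: faster
-- what changed: Splits A's single pop-and-format while-loop into two passes: first a scan that computes the consumed prefix length and removes it in one slice deletion, then a fold over that prefix carrying a boolean 'last emitted was a space' flag instead of inspecting cl2[-1].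
import Mathlib
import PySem

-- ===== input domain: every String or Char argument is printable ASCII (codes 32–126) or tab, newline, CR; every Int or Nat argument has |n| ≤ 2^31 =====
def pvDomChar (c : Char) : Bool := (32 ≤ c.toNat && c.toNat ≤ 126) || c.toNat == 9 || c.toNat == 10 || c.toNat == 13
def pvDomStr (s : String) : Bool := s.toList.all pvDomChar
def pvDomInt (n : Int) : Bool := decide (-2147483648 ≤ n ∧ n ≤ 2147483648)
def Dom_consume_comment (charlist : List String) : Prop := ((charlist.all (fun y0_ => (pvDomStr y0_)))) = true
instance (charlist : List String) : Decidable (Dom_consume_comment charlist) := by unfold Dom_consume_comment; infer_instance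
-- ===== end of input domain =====

-- B splits A's single pop-and-format while-loop into two passes: a consumed-prefix scan,
-- then a fold with a boolean last-was-space flag (return value proved equal; B performs
-- the same mutation of the caller's list in Python).


-- ===== PORT A =====
-- the while loop: pop head, append (with the double-space rule keyed on cl2's last element),
-- break when the rest is empty or its head is in "!_" (Python substring membership)
def consumeA : List String → List String → List String
  | [], cl2 => cl2        -- unreachable under Pre_ (pop(0) raises on the empty list)
  | c :: rest, cl2 =>
    let cl2' := if c == " " && (cl2.getLast? == some " ") then cl2 ++ ["&nbsp;"] else cl2 ++ [c]
    match rest with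
    | [] => cl2'
    | r :: _ => if PySem.Str.isIn r "!_" then cl2' else consumeA rest cl2'

def consume_comment (charlist : List String) : String :=
  PySem.Str.replace (PySem.Str.join "" (consumeA charlist [])) "( " "("

-- ===== PORT B =====
-- pass 1 of Source B: the counting while-loop (n = 1 + cutLenB charlist.tail)
def cutLenB : List String → Nat
  | [] => 0
  | c :: rest => if PySem.Str.isIn c "!_" then 0 else 1 + cutLenB rest

-- pass 2 of Source B: the for-loop over the consumed prefix with the prev_space flag
def fmtB : List String → Bool → List String
  | [], _ => []
  | c :: rest, prev =>
    if c == " " && prev then "&nbsp;" :: fmtB rest false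
    else c :: fmtB rest (c == " ")

def consume_comment_alt (charlist : List String) : String :=
  let n := 1 + cutLenB charlist.tail
  PySem.Str.replace (PySem.Str.join "" (fmtB (charlist.take n) false)) "( " "("

-- ===== PRECONDITION & SPEC =====
-- A pops from the front, so it raises IndexError on the empty list; that is all Pre_ excludes.
def Pre_consume_comment (charlist : List String) : Prop := charlist ≠ []
instance (charlist : List String) : Decidable (Pre_consume_comment charlist) := by unfold Pre_consume_comment; infer_instance
def pvWitness_consume_comment : List String := ["(", " ", " ", "a", "!"]

def Spec_consume_comment (charlist : List String) (out : String) : Prop := out = consume_comment_alt charlist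
instance (charlist : List String) (out : String) : Decidable (Spec_consume_comment charlist out) := by unfold Spec_consume_comment; infer_instance

-- ===== CLAIM (what is proved, stated in full; the proofs are below) =====
def Claim_equal_consume_comment : Prop := ∀ (charlist : List String), Dom_consume_comment charlist → Pre_consume_comment charlist → Spec_consume_comment charlist (consume_comment charlist)

-- ===== LEMMAS AND PROOFS =====

-- pass 1's count matches takeWhile on the rest of the list
theorem take_cutLenB (l : List String) :
    l.take (cutLenB l) = l.takeWhile (fun x => !PySem.Str.isIn x "!_") := by
  induction l with
  | nil => rfl
  | cons c rest ih =>
    simp only [cutLenB, List.takeWhile_cons]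
    by_cases h : PySem.Str.isIn c "!_" = true
    · rw [if_pos h, h]
      rfl
    · rw [if_neg h, (Bool.not_eq_true _).mp h]
      simp only [Bool.not_false, if_true, Nat.add_comm 1, List.take_succ_cons, ih]

-- one-step unfolding of A's loop on a list of length ≥ 2
theorem consumeA_cons_cons (c r : String) (rs cl2 : List String) :
    consumeA (c :: r :: rs) cl2
      = (if PySem.Str.isIn r "!_"
         then (if c == " " && (cl2.getLast? == some " ") then cl2 ++ ["&nbsp;"] else cl2 ++ [c])
         else consumeA (r :: rs)
                (if c == " " && (cl2.getLast? == some " ") then cl2 ++ ["&nbsp;"] else cl2 ++ [c])) := rfl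

-- the loop of A equals the accumulator followed by pass 2 of B over the consumed prefix,
-- with the prev flag equal to "the accumulator's last element is ' '"
theorem consumeA_eq_fmtB (rest : List String) : ∀ (c : String) (cl2 : List String),
    consumeA (c :: rest) cl2
      = cl2 ++ fmtB (c :: rest.takeWhile (fun x => !PySem.Str.isIn x "!_"))
                    (cl2.getLast? == some " ") := by
  induction rest with
  | nil =>
    intro c cl2
    show (if c == " " && (cl2.getLast? == some " ") then cl2 ++ ["&nbsp;"] else cl2 ++ [c])
        = cl2 ++ fmtB [c] (cl2.getLast? == some " ")
    by_cases h : (c == " " && (cl2.getLast? == some " ")) = true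
    · rw [if_pos h]; simp only [fmtB, if_pos h]
    · rw [if_neg h]; simp only [fmtB, if_neg h]
  | cons r rs ih =>
    intro c cl2
    rw [consumeA_cons_cons, List.takeWhile_cons]
    by_cases hr : PySem.Str.isIn r "!_" = true
    · rw [if_pos hr, hr]
      simp only [Bool.not_true, fmtB]
      by_cases h : (c == " " && (cl2.getLast? == some " ")) = true
      · rw [if_pos h, if_pos h]; simp [fmtB]
      · rw [if_neg h, if_neg h]; simp [fmtB]
    · rw [if_neg hr, (Bool.not_eq_true _).mp hr]
      simp only [Bool.not_false, if_true]
      by_cases h : (c == " " && (cl2.getLast? == some " ")) = true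
      · rw [if_pos h, ih r (cl2 ++ ["&nbsp;"]), List.getLast?_concat]
        simp only [fmtB, if_pos h]
        have hb : ((some "&nbsp;" == some " ") : Bool) = false := by decide
        rw [hb, List.append_cons]
        simp
      · rw [if_neg h, ih r (cl2 ++ [c]), List.getLast?_concat]
        simp only [fmtB, if_neg h]
        have hb : ((some c == some " ") : Bool) = (c == " ") := rfl
        rw [hb, List.append_cons]
        simp

-- ===== VERDICT (by name: the statement is the Claim_ definition above) =====
theorem consume_comment_spec : Claim_equal_consume_comment := by
  intro charlist _ hpre
  unfold Spec_consume_comment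
  match charlist with
  | [] => exact absurd rfl hpre
  | c :: rest =>
    unfold consume_comment consume_comment_alt
    rw [consumeA_eq_fmtB rest c []]
    simp only [List.nil_append, List.getLast?_nil, List.tail_cons]
    have htake : (c :: rest).take (1 + cutLenB rest)
        = c :: rest.takeWhile (fun x => !PySem.Str.isIn x "!_") := by
      rw [Nat.add_comm, List.take_succ_cons, take_cutLenB]
    rw [htake]
    rfl
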